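-- pv_equiv track=rewrite | github.com/rslinford/PythonScraps | wordcloud_from_webpage.py | is_cammel_case
-- ===== SOURCE A (Python) =====
-- def is_cammel_case(word):
--     has_lower_case = False
--     for c in word:
--         if 'a' <= c <= 'z':
--             has_lower_case = True
--         if 'A' <= c <= 'Z' and has_lower_case:
--             return True
--     return False
-- ===== SOURCE B (Python) =====
-- def is_cammel_case(word):
--     first_lower = len(word)
--     for i, c in enumerate(word):
--         if 'a' <= c <= 'z':
--             first_lower = i
--             break
--     last_upper = -1
--     for i, c in enumerate(word):
--         if 'A' <= c <= 'Z':
--             last_upper = i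
--     return first_lower < last_upper
-- ===== Notes on version B (the rewrite author's own statement) =====
-- stated objective: alternative
-- what changed: Instead of one fused flag-carrying scan that early-returns, B computes two independent quantities - the index of the first ASCII lowercase character (default len) and the index of the last ASCII uppercase character (default -1) - in two separate passes and returns their order comparison first_lower < last_upper.
import Mathlib
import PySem

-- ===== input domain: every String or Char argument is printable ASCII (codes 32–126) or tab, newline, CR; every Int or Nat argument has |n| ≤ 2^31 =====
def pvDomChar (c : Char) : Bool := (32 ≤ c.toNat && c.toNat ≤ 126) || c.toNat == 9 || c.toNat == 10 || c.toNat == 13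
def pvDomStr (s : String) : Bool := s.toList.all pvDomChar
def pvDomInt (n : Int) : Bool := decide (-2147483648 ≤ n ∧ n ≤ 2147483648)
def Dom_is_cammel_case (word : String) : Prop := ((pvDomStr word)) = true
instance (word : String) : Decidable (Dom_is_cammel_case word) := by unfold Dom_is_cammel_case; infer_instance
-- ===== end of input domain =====

-- B replaces A's fused flag-carrying early-return scan by two independent passes
-- (first-lowercase index vs last-uppercase index) compared at the end (alternative, same cost).

-- ===== PORT A =====
-- the loop over the characters, carrying the has_lower_case flag
def pvLoopA : List Char → Bool → Bool
  | [], _ => false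
  | c :: cs, has =>
    let has' := if 'a' ≤ c ∧ c ≤ 'z' then true else has
    if ('A' ≤ c ∧ c ≤ 'Z') ∧ has' = true then true else pvLoopA cs has'

def is_cammel_case (word : String) : Bool := pvLoopA word.toList false

-- ===== PORT B =====
-- first loop of B: index of the first ASCII lowercase character (break on first hit)
def pvFirstLow (i : Int) : List Char → Option Int
  | [] => none
  | c :: cs => if 'a' ≤ c ∧ c ≤ 'z' then some i else pvFirstLow (i + 1) cs

-- second loop of B: index of the last ASCII uppercase character, accumulator starts at -1
def pvLastUp (i : Int) (acc : Int) : List Char → Int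
  | [] => acc
  | c :: cs => pvLastUp (i + 1) (if 'A' ≤ c ∧ c ≤ 'Z' then i else acc) cs

def is_cammel_case_alt (word : String) : Bool :=
  let l := word.toList
  let firstLower := (pvFirstLow 0 l).getD (l.length : Int)
  let lastUpper := pvLastUp 0 (-1) l
  decide (firstLower < lastUpper)

-- ===== PRECONDITION & SPEC =====
def Spec_is_cammel_case (word : String) (out : Bool) : Prop := out = is_cammel_case_alt word
instance (word : String) (out : Bool) : Decidable (Spec_is_cammel_case word out) := by unfold Spec_is_cammel_case; infer_instance

-- ===== CLAIM (what is proved, stated in full; the proofs are below) =====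
def Claim_equal_is_cammel_case : Prop := ∀ (word : String), Dom_is_cammel_case word → Spec_is_cammel_case word (is_cammel_case word)

-- ===== LEMMAS AND PROOFS =====

-- a char in the lowercase range is not in the uppercase range
theorem pv_lower_not_upper {c : Char} (h : 'a' ≤ c ∧ c ≤ 'z') : ¬ ('A' ≤ c ∧ c ≤ 'Z') := by
  rintro ⟨_, h2⟩
  have h1 := h.1
  rw [Char.le_def, UInt32.le_iff_toNat_le] at h1 h2
  exact absurd (h1.trans h2) (by decide)

-- once the flag is set, A's loop is exactly "any uppercase in the rest"
theorem pvLoopA_true (cs : List Char) :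
    pvLoopA cs true = cs.any (fun c => decide ('A' ≤ c ∧ c ≤ 'Z')) := by
  induction cs with
  | nil => rfl
  | cons c cs ih =>
    simp only [pvLoopA, List.any_cons]
    by_cases h : 'A' ≤ c ∧ c ≤ 'Z' <;> simp [h, ih]

-- if no uppercase occurs, B's second loop returns its accumulator unchanged
theorem pvLastUp_none (cs : List Char) (i acc : Int)
    (h : cs.any (fun c => decide ('A' ≤ c ∧ c ≤ 'Z')) = false) :
    pvLastUp i acc cs = acc := by
  induction cs generalizing i acc with
  | nil => rfl
  | cons c cs ih =>
    simp only [List.any_cons, Bool.or_eq_false_iff, decide_eq_false_iff_not] at h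
    simp only [pvLastUp, if_neg h.1]
    exact ih i.succ acc h.2

-- if some uppercase occurs, the accumulator is irrelevant
theorem pvLastUp_acc (cs : List Char) (i acc acc' : Int)
    (h : cs.any (fun c => decide ('A' ≤ c ∧ c ≤ 'Z')) = true) :
    pvLastUp i acc cs = pvLastUp i acc' cs := by
  induction cs generalizing i acc acc' with
  | nil => simp at h
  | cons c cs ih =>
    simp only [pvLastUp]
    by_cases hc : 'A' ≤ c ∧ c ≤ 'Z'
    · simp [hc]
    · simp only [List.any_cons, decide_eq_true_eq, Bool.or_eq_true] at h
      rcases h with h | h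
      · exact absurd h hc
      · simp only [if_neg hc]; exact ih (i + 1) acc acc' h

-- if some uppercase occurs, B's second loop returns an index ≥ i (for acc < i)
theorem pvLastUp_ge (cs : List Char) (i acc : Int) (hacc : acc < i)
    (h : cs.any (fun c => decide ('A' ≤ c ∧ c ≤ 'Z')) = true) :
    i ≤ pvLastUp i acc cs := by
  induction cs generalizing i acc with
  | nil => simp at h
  | cons c cs ih =>
    simp only [pvLastUp]
    by_cases hc : 'A' ≤ c ∧ c ≤ 'Z'
    · simp only [if_pos hc]
      by_cases h2 : cs.any (fun c => decide ('A' ≤ c ∧ c ≤ 'Z')) = true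
      · have := ih (i + 1) i (by omega) h2; omega
      · rw [pvLastUp_none cs (i + 1) i (by simpa using h2)]
    · simp only [if_neg hc]
      simp only [List.any_cons, decide_eq_true_eq, Bool.or_eq_true] at h
      rcases h with h | h
      · exact absurd h hc
      · have := ih (i + 1) acc (by omega) h; omega

-- B's first loop only returns indices ≥ i
theorem pvFirstLow_ge (cs : List Char) (i j : Int) (h : pvFirstLow i cs = some j) : i ≤ j := by
  induction cs generalizing i with
  | nil => simp [pvFirstLow] at h
  | cons c cs ih =>
    simp only [pvFirstLow] at h
    by_cases hc : 'a' ≤ c ∧ c ≤ 'z'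
    · rw [if_pos hc] at h; simp only [Option.some.injEq] at h; omega
    · rw [if_neg hc] at h; have := ih (i + 1) h; omega

-- main invariant: A's loop with the flag unset equals B's comparison, for any offset i
theorem pv_main (cs : List Char) (i : Int) :
    pvLoopA cs false =
      decide ((pvFirstLow i cs).getD (i + (cs.length : Int)) < pvLastUp i (i - 1) cs) := by
  induction cs generalizing i with
  | nil => simp [pvLoopA, pvFirstLow, pvLastUp]
  | cons c cs ih =>
    by_cases hl : 'a' ≤ c ∧ c ≤ 'z'
    · -- c lowercase (hence not uppercase): flag becomes true; first_lower = i
      have hnu := pv_lower_not_upper hl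
      simp only [pvLoopA, pvFirstLow, pvLastUp, if_pos hl, if_neg hnu]
      rw [if_neg (by simp [hnu]), pvLoopA_true]
      simp only [Option.getD_some]
      by_cases h2 : cs.any (fun c => decide ('A' ≤ c ∧ c ≤ 'Z')) = true
      · have := pvLastUp_ge cs (i + 1) (i - 1) (by omega) h2
        simp only [h2]
        exact (decide_eq_true (by omega)).symm
      · rw [pvLastUp_none cs (i + 1) (i - 1) (by simpa using h2)]
        simp only [Bool.not_eq_true] at h2
        rw [h2]
        exact (decide_eq_false (by omega)).symm
    · by_cases hu : 'A' ≤ c ∧ c ≤ 'Z'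
      · -- c uppercase, flag still false: continue; last_upper accumulator becomes i
        simp only [pvLoopA, pvFirstLow, pvLastUp, if_neg hl, if_pos hu]
        rw [if_neg (by simp)]
        rw [ih (i + 1)]
        have e1 : i + 1 - 1 = i := by ring
        have e2 : i + (((c :: cs).length : Nat) : Int) = i + 1 + (cs.length : Int) := by
          simp [List.length_cons]; ring
        rw [e1, e2]
      · -- c neither: everything just shifts by one
        simp only [pvLoopA, pvFirstLow, pvLastUp, if_neg hl, if_neg hu]
        rw [if_neg (by simp [hu])]
        rw [ih (i + 1)]
        have e1 : i + 1 - 1 = i := by ring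
        have e2 : i + (((c :: cs).length : Nat) : Int) = i + 1 + (cs.length : Int) := by
          simp [List.length_cons]; ring
        rw [e1, e2]
        by_cases h2 : cs.any (fun c => decide ('A' ≤ c ∧ c ≤ 'Z')) = true
        · rw [pvLastUp_acc cs (i + 1) i (i - 1) h2]
        · have h2' : cs.any (fun c => decide ('A' ≤ c ∧ c ≤ 'Z')) = false := by simpa using h2
          rw [pvLastUp_none cs (i + 1) i h2', pvLastUp_none cs (i + 1) (i - 1) h2']
          cases hc : pvFirstLow (i + 1) cs with
          | none => simp only [Option.getD_none]
                    refine (decide_eq_false (by omega)).trans (decide_eq_false (by omega)).symm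
          | some j => have := pvFirstLow_ge cs (i + 1) j hc
                      simp only [Option.getD_some]
                      refine (decide_eq_false (by omega)).trans (decide_eq_false (by omega)).symm

-- ===== VERDICT (by name: the statement is the Claim_ definition above) =====
theorem is_cammel_case_spec : Claim_equal_is_cammel_case := by
  intro word _
  show is_cammel_case word = is_cammel_case_alt word
  simp only [is_cammel_case, is_cammel_case_alt]
  have := pv_main word.toList 0
  simpa using this
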